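-- pv_equiv track=rewrite | github.com/shreshtha48/pyarxaas | pyaaas/converters.py | _create_index_and_values_for
-- ===== SOURCE A (Python) =====
-- def _create_index_and_values_for(field, hierarchy):
--     transform_model_index = []
--     transform_model_values = []
--
--     for level in range(1, _get_hierarchy_levels(hierarchy)):
--         model_index = [field]
--         level_values = []
--         model_index.append(f"level_{level}")
--         transform_model_index.append(model_index)
--         for row in hierarchy:
--             level_values.append(row[level])
--         transform_model_values.append(level_values)
--     return transform_model_index, transform_model_values
--
-- def _get_hierarchy_levels(hierarchy):
--     return len(hierarchy[0])
-- ===== SOURCE B (Python) =====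
-- def _create_index_and_values_for(field, hierarchy):
--     levels = len(hierarchy[0])
--     cols = [list(c) for c in zip(*hierarchy)]
--     transform_model_values = cols[1:levels]
--     transform_model_index = [[field, f"level_{level}"] for level in range(1, levels)]
--     return transform_model_index, transform_model_values
-- ===== Notes on version B (the rewrite author's own statement) =====
-- stated objective: idiomatic
-- what changed: B transposes the hierarchy once column-major with zip(*hierarchy) and slices out columns 1..levels-1, and builds the index with a comprehension, instead of A's nested loops re-scanning every row once per level.
import Mathlib
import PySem

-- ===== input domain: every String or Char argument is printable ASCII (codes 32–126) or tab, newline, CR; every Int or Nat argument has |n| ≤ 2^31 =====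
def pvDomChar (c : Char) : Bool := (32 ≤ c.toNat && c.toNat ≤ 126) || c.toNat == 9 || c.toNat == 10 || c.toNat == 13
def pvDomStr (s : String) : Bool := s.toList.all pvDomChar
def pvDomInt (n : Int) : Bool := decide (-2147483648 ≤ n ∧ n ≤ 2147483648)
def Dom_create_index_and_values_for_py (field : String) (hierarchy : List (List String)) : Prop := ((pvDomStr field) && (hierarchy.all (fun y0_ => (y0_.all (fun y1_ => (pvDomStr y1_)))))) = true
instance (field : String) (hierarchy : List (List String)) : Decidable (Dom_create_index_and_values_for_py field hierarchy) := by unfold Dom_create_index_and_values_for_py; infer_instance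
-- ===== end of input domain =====

-- B transposes the hierarchy once (zip) and slices out columns 1..levels-1, instead of A's
-- nested per-level rescans of every row; same cost, more idiomatic.

-- ===== PORT A =====
-- _get_hierarchy_levels(hierarchy) = len(hierarchy[0]); hierarchy[0] raises IndexError on [] (excluded by Pre_)
def get_hierarchy_levels_py (hierarchy : List (List String)) : Int :=
  (((PySem.List.pyGet? hierarchy 0).getD []).length : Int)

def create_index_and_values_for_py (field : String) (hierarchy : List (List String)) : List (List String) × List (List String) :=
  (PySem.List.pyRange 1 (get_hierarchy_levels_py hierarchy)).foldl
    (fun acc level =>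
      let model_index := [field] ++ ["level_" ++ PySem.Int.toStr level]
      let level_values := hierarchy.foldl (fun lv row => lv ++ [PySem.List.pyGetD row level ""]) []
      (acc.1 ++ [model_index], acc.2 ++ [level_values]))
    ([], [])

-- ===== PORT B =====
-- zip(*hierarchy): number of columns = min row length (0 for no rows), column j = j-th entry of each row
def pvZipCols (m : List (List String)) : List (List String) :=
  (List.range ((m.map List.length).min?.getD 0)).map
    (fun j => m.map (fun row => row.getD j ""))

def create_index_and_values_for_py_alt (field : String) (hierarchy : List (List String)) : List (List String) × List (List String) :=
  let levels : Int := (((PySem.List.pyGet? hierarchy 0).getD []).length : Int)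
  let values := PySem.List.slice (pvZipCols hierarchy) (some 1) (some levels)
  let index := (PySem.List.pyRange 1 levels).map (fun level => [field, "level_" ++ PySem.Int.toStr level])
  (index, values)

-- ===== PRECONDITION & SPEC =====
-- Pre_ excludes exactly the inputs where A raises IndexError: the empty hierarchy (hierarchy[0])
-- and, when there are at least two levels, ragged input with a row shorter than the first row (row[level]).
def Pre_create_index_and_values_for_py (field : String) (hierarchy : List (List String)) : Prop :=
  hierarchy ≠ [] ∧
    ((hierarchy.headD []).length ≤ 1 ∨ ∀ row ∈ hierarchy, (hierarchy.headD []).length ≤ row.length)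
instance (field : String) (hierarchy : List (List String)) : Decidable (Pre_create_index_and_values_for_py field hierarchy) := by unfold Pre_create_index_and_values_for_py; infer_instance

def pvWitness_create_index_and_values_for_py : String × List (List String) :=
  ("age", [["1", "0-9", "*"], ["2", "0-9", "*"]])

def Spec_create_index_and_values_for_py (field : String) (hierarchy : List (List String)) (out : List (List String) × List (List String)) : Prop := out = create_index_and_values_for_py_alt field hierarchy
instance (field : String) (hierarchy : List (List String)) (out : List (List String) × List (List String)) : Decidable (Spec_create_index_and_values_for_py field hierarchy out) := by unfold Spec_create_index_and_values_for_py; infer_instance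

-- ===== CLAIM (what is proved, stated in full; the proofs are below) =====
def Claim_equal_create_index_and_values_for_py : Prop := ∀ (field : String) (hierarchy : List (List String)), Dom_create_index_and_values_for_py field hierarchy → Pre_create_index_and_values_for_py field hierarchy → Spec_create_index_and_values_for_py field hierarchy (create_index_and_values_for_py field hierarchy)

-- ===== LEMMAS AND PROOFS =====

theorem pv_pyRange_one (n : Nat) :
    PySem.List.pyRange 1 (n : Int) = ((List.range n).drop 1).map Int.ofNat := by
  cases n with
  | zero => decide
  | succ k =>
    have h := PySem.List.pyRange_zero_natCast (k+1)
    rw [PySem.List.pyRange_one_cons (by exact_mod_cast Nat.succ_pos k)] at h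
    have h2 := congrArg List.tail h
    simp only [List.tail_cons] at h2
    rw [List.drop_one, List.map_tail]
    simpa using h2

theorem pv_min_le (m : List (List String)) (r0 : List String) (rest : List (List String))
    (hm : m = r0 :: rest) (h : ∀ row ∈ m, r0.length ≤ row.length) :
    r0.length ≤ (m.map List.length).min?.getD 0 := by
  obtain ⟨x, hx⟩ : ∃ x, (m.map List.length).min? = some x := by
    subst hm; exact Option.isSome_iff_exists.mp rfl
  rw [hx, Option.getD_some]
  obtain ⟨row, hrow, rfl⟩ := List.mem_map.1 (List.min?_mem hx)
  exact h row hrow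

theorem pv_range_trim (n L : Nat) (h : L ≤ n ∨ L ≤ 1) :
    ((List.range n).drop 1).take (L-1) = (List.range L).drop 1 := by
  rw [← List.drop_take]
  rcases h with h | h
  · rw [List.take_range, Nat.min_eq_left h]
  · interval_cases L
    · simp
    · cases n with
      | zero => simp
      | succ k => simp [List.range_succ_eq_map]

-- ===== VERDICT (by name: the statement is the Claim_ definition above) =====
theorem create_index_and_values_for_py_spec : Claim_equal_create_index_and_values_for_py := by
  intro field hierarchy _ hpre
  obtain ⟨hne, hcase⟩ := hpre
  obtain ⟨r0, rest, rfl⟩ := List.exists_cons_of_ne_nil hne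
  simp only [List.headD_cons] at hcase
  have hget : (PySem.List.pyGet? (r0 :: rest) 0).getD [] = r0 := by
    simp [PySem.List.pyGet?, PySem.List.pyIdx?]
  unfold Spec_create_index_and_values_for_py
  unfold create_index_and_values_for_py create_index_and_values_for_py_alt get_hierarchy_levels_py
  simp only [hget]
  rw [PySem.List.foldl_prod_mk
        (fun a level => a ++ [[field] ++ ["level_" ++ PySem.Int.toStr level]])
        (fun b level => b ++ [(r0 :: rest).foldl (fun lv row => lv ++ [PySem.List.pyGetD row level ""]) []])]
  rw [PySem.List.foldl_append_singleton_eq_map, PySem.List.foldl_append_singleton_eq_map]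
  refine Prod.ext ?_ ?_
  · simp
  · simp only [List.nil_append]
    have hinner : ∀ level : Int, (r0 :: rest).foldl (fun lv row => lv ++ [PySem.List.pyGetD row level ""]) []
        = (r0 :: rest).map (fun row => PySem.List.pyGetD row level "") := by
      intro level
      simpa using PySem.List.foldl_append_singleton_eq_map (fun row => PySem.List.pyGetD row level "") (r0 :: rest) []
    have hn : r0.length ≤ ((r0 :: rest).map List.length).min?.getD 0 ∨ r0.length ≤ 1 := by
      rcases hcase with h | h
      · exact Or.inr h
      · exact Or.inl (pv_min_le _ r0 rest rfl h)
    rw [pv_pyRange_one r0.length]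
    rw [pvZipCols, PySem.List.slice_toNat _ (by norm_num) (by positivity)]
    rw [← List.map_drop, ← List.map_take]
    simp only [Int.toNat_one, Int.toNat_natCast]
    rw [pv_range_trim _ _ hn]
    rw [List.map_map]
    refine List.map_congr_left ?_
    intro k hk
    simp [PySem.List.pyGetD_natCast, hinner]
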